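-- pv_equiv track=rewrite | github.com/Aquachoc/TTT9 | grid.py | bToG
-- ===== SOURCE A (Python) =====
-- def bToG(grid):
--     G=[]
--     L=[] #grilel annexe
--     for i in range(3):
--         L=[]
--         for j in range(3):
--             L.append(bgElem(grid, i,j))
--         G.append(L)
--     return G
--
-- def bgElem(grid,i,j):
--     return (grid>>((i*3+j)*2))%4
-- ===== SOURCE B (Python) =====
-- def bToG(grid):
--     flat = []
--     for _ in range(9):
--         flat.append(grid % 4)
--         grid //= 4
--     return [flat[0:3], flat[3:6], flat[6:9]]
-- ===== Notes on version B (the rewrite author's own statement) =====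
-- stated objective: simpler
-- what changed: Replaces the per-cell helper that recomputes an absolute shift amount from the row and column indices inside nested loops with one flat nine-step pass that consumes the integer sequentially (append the low base-four digit, then floor-divide) and reshapes the flat list into rows by slicing.
import Mathlib
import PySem

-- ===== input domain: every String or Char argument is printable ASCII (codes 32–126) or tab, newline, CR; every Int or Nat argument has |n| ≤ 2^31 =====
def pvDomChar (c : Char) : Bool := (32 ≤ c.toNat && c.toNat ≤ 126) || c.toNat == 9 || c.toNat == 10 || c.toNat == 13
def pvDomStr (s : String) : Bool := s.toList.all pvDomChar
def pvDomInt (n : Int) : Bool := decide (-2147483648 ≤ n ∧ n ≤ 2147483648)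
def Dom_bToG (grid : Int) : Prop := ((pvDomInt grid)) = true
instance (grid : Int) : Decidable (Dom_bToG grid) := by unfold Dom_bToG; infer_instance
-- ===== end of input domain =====

-- B drops the bgElem absolute-shift index arithmetic for one flat sequential pass plus slicing; same values, no speed claim.

-- ===== PORT A =====
def bgElem (grid : Int) (i j : Nat) : Int :=
  PySem.Int.mod (grid >>> ((i * 3 + j) * 2)) 4   -- Python '>>' on int is Lean '>>>' on Int (floors on negatives)

def bToG (grid : Int) : List (List Int) :=
  (List.range 3).foldl
    (fun G i =>
      G ++ [(List.range 3).foldl (fun L j => L ++ [bgElem grid i j]) []])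
    []

-- ===== PORT B =====
def bToG_alt (grid : Int) : List (List Int) :=
  let s := (List.range 9).foldl
    (fun (s : Int × List Int) _ =>
      (PySem.Int.floordiv s.1 4, s.2 ++ [PySem.Int.mod s.1 4]))
    (grid, [])
  [PySem.List.slice s.2 (some 0) (some 3),
   PySem.List.slice s.2 (some 3) (some 6),
   PySem.List.slice s.2 (some 6) (some 9)]

-- ===== PRECONDITION & SPEC =====
def Spec_bToG (grid : Int) (out : List (List Int)) : Prop := out = bToG_alt grid
instance (grid : Int) (out : List (List Int)) : Decidable (Spec_bToG grid out) := by unfold Spec_bToG; infer_instance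

-- ===== CLAIM (what is proved, stated in full; the proofs are below) =====
def Claim_equal_bToG : Prop := ∀ (grid : Int), Dom_bToG grid → Spec_bToG grid (bToG grid)

-- ===== LEMMAS AND PROOFS =====
theorem pv_shr_fd (g : Int) (k : Nat) :
    PySem.Int.floordiv (g >>> k) 4 = g >>> (k + 2) := by
  rw [PySem.Int.floordiv_eq_ediv_of_pos (by norm_num : (0:Int) < 4)]
  rw [Int.shiftRight_eq_div_pow, Int.shiftRight_eq_div_pow]
  push_cast
  rw [Int.ediv_ediv_of_nonneg (by positivity), pow_add]
  norm_num

-- ===== VERDICT (by name: the statement is the Claim_ definition above) =====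
theorem bToG_spec : Claim_equal_bToG := by
  intro grid _
  unfold Spec_bToG bToG bToG_alt bgElem
  have h0 : grid = grid >>> (0:Nat) := by simp
  simp only [List.range_succ, List.range_zero, List.foldl_cons,
    List.foldl_nil, List.nil_append, List.cons_append]
  rw [h0]
  simp only [pv_shr_fd]
  simp [PySem.List.slice]
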